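-- pv_equiv track=rewrite | github.com/mjs486/CodeEval | BalancedSmileys/balancedsmileys.py | isBalanced
-- ===== SOURCE A (Python) =====
-- def isBalanced(s):
--     if not s:
--         return True
--     elif len(s) == 1 and (s.isalpha() or s == ' ' or s == ':'):
--         return True
--     else:
--         maxParen = 0
--         minParen = 0
--         for i in range(len(s)):
--             if s[i] == '(':
--                 maxParen += 1
--                 if i == 0 or s[i-1] != ':':
--                     minParen += 1
--             elif s[i] == ')':
--                 if i == 0 or s[i-1] != ':':
--                     maxParen -= 1
--                 minParen = max(0,minParen-1)
--         if maxParen >= 0 and minParen == 0: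
--             return True
--         else:
--             return False
-- ===== SOURCE B (Python) =====
-- def isBalanced(s):
--     n = len(s)
--     opens = sum(1 for c in s if c == '(')
--     hard_closes = sum(1 for i in range(n) if s[i] == ')' and (i == 0 or s[i-1] != ':'))
--     if opens - hard_closes < 0:
--         return False
--     run = 0
--     best = 0
--     for i in range(n - 1, -1, -1):
--         c = s[i]
--         if c == '(':
--             if i == 0 or s[i-1] != ':':
--                 run += 1
--         elif c == ')':
--             run -= 1
--         if run > best:
--             best = run
--     return best == 0
-- ===== Notes on version B (the rewrite author's own statement) =====
-- stated objective: alternative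
-- what changed: A tracks maxParen and minParen together in one forward loop; B computes the maxParen total as a simple count of opening parens minus hard closing parens (those not preceded by a colon), rejects early if that is negative, and decides that minParen ends at zero by a separate right-to-left scan keeping a running suffix sum and its maximum (the final clamped minParen equals the clamped maximum suffix sum), dropping A's redundant empty-string and single-character guards.
import Mathlib
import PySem

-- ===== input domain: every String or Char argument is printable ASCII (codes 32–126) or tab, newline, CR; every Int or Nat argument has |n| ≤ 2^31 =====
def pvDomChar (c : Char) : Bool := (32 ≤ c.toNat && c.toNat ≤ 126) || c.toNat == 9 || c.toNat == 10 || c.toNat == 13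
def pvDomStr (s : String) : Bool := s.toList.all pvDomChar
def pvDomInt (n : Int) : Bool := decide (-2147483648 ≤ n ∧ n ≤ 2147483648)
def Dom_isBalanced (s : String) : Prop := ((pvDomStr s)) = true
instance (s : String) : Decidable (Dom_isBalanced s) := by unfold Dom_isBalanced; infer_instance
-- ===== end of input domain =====

-- B replaces A's single two-counter loop by a closed-form count for maxParen plus a
-- right-to-left maximum-suffix-sum scan for minParen (objective: alternative decomposition).

-- ===== PORT A =====
-- the for-loop of A: state (maxParen, minParen), i over range(len(s))
def isBalancedLoop (cs : List Char) : Int × Int :=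
  (PySem.List.pyRange 0 (cs.length : Int) 1).foldl (fun (st : Int × Int) i =>
    if PySem.List.pyGet? cs i = some '(' then
      (st.1 + 1, if i = 0 ∨ PySem.List.pyGet? cs (i - 1) ≠ some ':' then st.2 + 1 else st.2)
    else if PySem.List.pyGet? cs i = some ')' then
      ((if i = 0 ∨ PySem.List.pyGet? cs (i - 1) ≠ some ':' then st.1 - 1 else st.1),
       max 0 (st.2 - 1))
    else st) (0, 0)

def isBalanced (s : String) : Bool :=
  if s.toList = [] then true
  -- s.isalpha() ported by hand (exact): nonempty and every character alphabetic
  else if s.toList.length = 1 ∧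
      ((s.toList ≠ [] ∧ ∀ c ∈ s.toList, PySem.Chars.isalpha c) ∨ s.toList = [' '] ∨ s.toList = [':']) then
    true
  else if (isBalancedLoop s.toList).1 ≥ 0 ∧ (isBalancedLoop s.toList).2 = 0 then true
  else false

-- ===== PORT B =====
-- opens = sum(1 for c in s if c == '(')
def isBalancedAltOpens (cs : List Char) : Int :=
  cs.foldl (fun acc c => if c = '(' then acc + 1 else acc) 0

-- hard_closes = sum(1 for i in range(n) if s[i] == ')' and (i == 0 or s[i-1] != ':'))
def isBalancedAltHard (cs : List Char) : Int :=
  (PySem.List.pyRange 0 (cs.length : Int) 1).foldl (fun acc i =>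
    if PySem.List.pyGet? cs i = some ')' ∧ (i = 0 ∨ PySem.List.pyGet? cs (i - 1) ≠ some ':') then
      acc + 1
    else acc) 0

-- the descending loop: state (run, best), i over range(n-1, -1, -1)
def isBalancedAltScan (cs : List Char) : Int × Int :=
  (PySem.List.pyRange ((cs.length : Int) - 1) (-1) (-1)).foldl (fun (st : Int × Int) i =>
    let run :=
      if PySem.List.pyGet? cs i = some '(' then
        (if i = 0 ∨ PySem.List.pyGet? cs (i - 1) ≠ some ':' then st.1 + 1 else st.1)
      else if PySem.List.pyGet? cs i = some ')' then st.1 - 1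
      else st.1
    (run, if run > st.2 then run else st.2)) (0, 0)

def isBalanced_alt (s : String) : Bool :=
  if isBalancedAltOpens s.toList - isBalancedAltHard s.toList < 0 then false
  else decide ((isBalancedAltScan s.toList).2 = 0)

-- ===== PRECONDITION & SPEC =====
def Spec_isBalanced (s : String) (out : Bool) : Prop := out = isBalanced_alt s
instance (s : String) (out : Bool) : Decidable (Spec_isBalanced s out) := by unfold Spec_isBalanced; infer_instance

-- ===== CLAIM (what is proved, stated in full; the proofs are below) =====
def Claim_equal_isBalanced : Prop := ∀ (s : String), Dom_isBalanced s → Spec_isBalanced s (isBalanced s)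

-- ===== LEMMAS AND PROOFS =====

-- each character paired with its predecessor (p seeds the predecessor of the first)
def pvZp : Option Char → List Char → List (Option Char × Char)
  | _, [] => []
  | p, c :: rest => (p, c) :: pvZp (some c) rest

-- predecessor of a hypothetical character following cs (p if cs is empty)
def pvLast (p : Option Char) (cs : List Char) : Option Char := cs.getLast?.or p

-- minParen delta of one character
def pvD (pc : Option Char × Char) : Int :=
  if pc.2 = '(' then (if pc.1 ≠ some ':' then 1 else 0)
  else if pc.2 = ')' then -1 else 0

-- maxParen delta of one character
def pvDmax (pc : Option Char × Char) : Int :=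
  if pc.2 = '(' then 1
  else if pc.2 = ')' then (if pc.1 ≠ some ':' then -1 else 0) else 0

-- clamped-at-zero left fold (A's minParen recurrence)
def pvClamp (b : Int) (l : List Int) : Int := l.foldl (fun x dd => max 0 (x + dd)) b

-- max prefix sum (empty prefix included) of a delta list
def pvPm (r : List Int) : Int := r.foldr (fun dd acc => max 0 (dd + acc)) 0

-- B's scan step on deltas
def pvStep (st : Int × Int) (dd : Int) : Int × Int :=
  (st.1 + dd, if st.1 + dd > st.2 then st.1 + dd else st.2)

-- A's loop body, as a function of (previous char?, current char?)
def pvGA (st : Int × Int) (pc : Option Char × Option Char) : Int × Int :=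
  if pc.2 = some '(' then (st.1 + 1, if pc.1 ≠ some ':' then st.2 + 1 else st.2)
  else if pc.2 = some ')' then ((if pc.1 ≠ some ':' then st.1 - 1 else st.1), max 0 (st.2 - 1))
  else st

-- B's hard_closes body, same view
def pvGH (acc : Int) (pc : Option Char × Option Char) : Int :=
  if pc.2 = some ')' ∧ pc.1 ≠ some ':' then acc + 1 else acc

-- B's scan body, same view
def pvGS (st : Int × Int) (pc : Option Char × Option Char) : Int × Int :=
  let run :=
    if pc.2 = some '(' then (if pc.1 ≠ some ':' then st.1 + 1 else st.1)
    else if pc.2 = some ')' then st.1 - 1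
    else st.1
  (run, if run > st.2 then run else st.2)

theorem pvLast_cons (p : Option Char) (a : Char) (rest : List Char) :
    pvLast p (a :: rest) = pvLast (some a) rest := by
  cases rest with
  | nil => simp [pvLast]
  | cons b t =>
    simp only [pvLast, List.getLast?_cons_cons]
    cases h : (b :: t).getLast? with
    | none => simp at h
    | some x => rfl

theorem pvZp_append (cs : List Char) (p : Option Char) (c : Char) :
    pvZp p (cs ++ [c]) = pvZp p cs ++ [(pvLast p cs, c)] := by
  induction cs generalizing p with
  | nil => simp [pvZp, pvLast]
  | cons a rest ih => simp [pvZp, ih, pvLast_cons]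

theorem pvZp_map_snd (cs : List Char) (p : Option Char) :
    (pvZp p cs).map Prod.snd = cs := by
  induction cs generalizing p with
  | nil => rfl
  | cons a rest ih => simp [pvZp, ih]

theorem pvMapPairs (cs : List Char) :
    (PySem.List.pyRange 0 (cs.length : Int) 1).map
      (fun i => ((if i = 0 then none else PySem.List.pyGet? cs (i - 1)), PySem.List.pyGet? cs i))
    = (pvZp none cs).map (fun pc => (pc.1, some pc.2)) := by
  induction cs using List.reverseRecOn with
  | nil => simp [pvZp]
  | append_singleton cs c ih =>
    have hn : (0:Int) ≤ (cs.length : Int) := by exact_mod_cast Nat.zero_le _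
    have hlen : (((cs ++ [c]).length : Nat) : Int) = (cs.length : Int) + 1 := by
      simp
    rw [hlen, PySem.List.pyRange_one_succ_right hn, List.map_append, pvZp_append, List.map_append]
    congr 1
    · rw [← ih]
      apply List.map_congr_left
      intro i hi
      obtain ⟨h0, hlt⟩ := PySem.List.mem_pyRange_one.mp hi
      have hget : PySem.List.pyGet? (cs ++ [c]) i = PySem.List.pyGet? cs i := by
        rw [PySem.List.pyGet?_of_nonneg _ h0, PySem.List.pyGet?_of_nonneg _ h0,
          List.getElem?_append_left (by omega)]
      by_cases hi0 : i = 0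
      · subst hi0
        simp only [if_true]
        rw [hget]
      · have h1 : (0:Int) ≤ i - 1 := by omega
        have hget1 : PySem.List.pyGet? (cs ++ [c]) (i - 1) = PySem.List.pyGet? cs (i - 1) := by
          rw [PySem.List.pyGet?_of_nonneg _ h1, PySem.List.pyGet?_of_nonneg _ h1,
            List.getElem?_append_left (by omega)]
        simp [hi0, hget, hget1]
    · have h2 : PySem.List.pyGet? (cs ++ [c]) ((cs.length : Nat) : Int) = some c := by
        simpa using PySem.List.pyGet?_append_length cs [] c
      cases cs with
      | nil => simp [pvLast]
      | cons a t =>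
        have hne : ((((a :: t).length : Nat)) : Int) ≠ 0 := by
          push_cast [List.length_cons]; omega
        have h1 : (0:Int) ≤ ((a :: t).length : Int) - 1 := by
          simp only [List.length_cons]; push_cast; omega
        have hprev : PySem.List.pyGet? ((a :: t) ++ [c]) (((a :: t).length : Int) - 1)
            = (a :: t).getLast? := by
          rw [PySem.List.pyGet?_of_nonneg _ h1, List.getElem?_append_left (by simp)]
          rw [List.getLast?_eq_getElem?]
          congr 1
          simp only [List.length_cons]
          omega
        simp only [List.map_cons, List.map_nil, if_neg hne, h2, hprev, pvLast]
        cases h : (a :: t).getLast? with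
        | none => simp at h
        | some x => rfl

-- index fold over range(len cs) = structural fold over pvZp
theorem pvFoldIdx {σ : Type} (cs : List Char) (g : σ → Option Char × Option Char → σ) (init : σ) :
    (PySem.List.pyRange 0 (cs.length : Int) 1).foldl
      (fun st i => g st ((if i = 0 then none else PySem.List.pyGet? cs (i - 1)), PySem.List.pyGet? cs i)) init
    = (pvZp none cs).foldl (fun st pc => g st (pc.1, some pc.2)) init := by
  rw [← List.foldl_map (f := fun i => ((if i = 0 then none else PySem.List.pyGet? cs (i - 1)), PySem.List.pyGet? cs i)),
    pvMapPairs, List.foldl_map]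

-- descending index fold = structural fold over the reversed pvZp
theorem pvFoldIdxRev {σ : Type} (cs : List Char) (g : σ → Option Char × Option Char → σ) (init : σ) :
    (PySem.List.pyRange ((cs.length : Int) - 1) (-1) (-1)).foldl
      (fun st i => g st ((if i = 0 then none else PySem.List.pyGet? cs (i - 1)), PySem.List.pyGet? cs i)) init
    = ((pvZp none cs).reverse).foldl (fun st pc => g st (pc.1, some pc.2)) init := by
  have h : PySem.List.pyRange ((cs.length : Int) - 1) (-1) (-1)
      = (PySem.List.pyRange 0 (cs.length : Int) 1).reverse := by
    have := PySem.List.pyRange_neg_one_eq_reverse ((cs.length : Int) - 1) (-1)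
    simpa using this
  rw [h,
    ← List.foldl_map (f := fun i => ((if i = 0 then none else PySem.List.pyGet? cs (i - 1)), PySem.List.pyGet? cs i)),
    List.map_reverse, pvMapPairs, ← List.map_reverse, List.foldl_map]

theorem foldA_struct (l : List (Option Char × Char)) (a b : Int) (hb : 0 ≤ b) :
    l.foldl (fun st pc => pvGA st (pc.1, some pc.2)) (a, b)
    = (a + (l.map pvDmax).sum, pvClamp b (l.map pvD)) := by
  induction l generalizing a b with
  | nil => simp [pvClamp]
  | cons pc l ih =>
    simp only [List.foldl_cons, List.map_cons, List.sum_cons]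
    have hstep : pvGA (a, b) (pc.1, some pc.2)
        = (a + pvDmax pc, max 0 (b + pvD pc)) := by
      simp only [pvGA, pvDmax, pvD]
      by_cases h1 : pc.2 = '(' <;> by_cases h2 : pc.1 = some ':' <;>
        by_cases h3 : pc.2 = ')' <;> simp [h1, h2, h3] <;> omega
    rw [hstep, ih _ _ (by omega)]
    simp [pvClamp, add_assoc]

theorem pvPm_nonneg (r : List Int) : 0 ≤ pvPm r := by
  induction r with
  | nil => simp [pvPm]
  | cons d r ih => simp only [pvPm, List.foldr_cons] at *; omega

theorem pvScan_pm (r : List Int) : ∀ run best : Int, run ≤ best →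
    (r.foldl pvStep (run, best)).2 = max best (run + pvPm r) := by
  induction r with
  | nil => intro run best h; simp [pvPm]; omega
  | cons d r ih =>
    intro run best h
    have hp := pvPm_nonneg r
    simp only [List.foldl_cons, pvStep, pvPm, List.foldr_cons] at *
    rw [ih (run + d) (if run + d > best then run + d else best) (by split_ifs <;> omega)]
    split_ifs <;> omega

theorem pvClamp_rev (l : List Int) : pvClamp 0 l = pvPm l.reverse := by
  induction l using List.reverseRecOn with
  | nil => simp [pvClamp, pvPm]
  | append_singleton l d ih =>
    rw [pvClamp, List.foldl_append]
    simp only [List.foldl_cons, List.foldl_nil, List.reverse_append, List.reverse_cons,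
      List.reverse_nil, List.nil_append, List.singleton_append]
    simp only [pvPm, List.foldr_cons]
    rw [show (List.foldl (fun x dd => max 0 (x + dd)) 0 l) = pvClamp 0 l from rfl, ih]
    simp only [pvPm]
    omega

theorem pvSum_dmax (l : List (Option Char × Char)) :
    (l.map pvDmax).sum
      = (l.map (fun pc => if pc.2 = '(' then (1:Int) else 0)).sum
        - (l.map (fun pc => if pc.2 = ')' ∧ pc.1 ≠ some ':' then (1:Int) else 0)).sum := by
  induction l with
  | nil => simp
  | cons pc l ih =>
    simp only [List.map_cons, List.sum_cons, pvDmax]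
    by_cases h1 : pc.2 = '(' <;> by_cases h2 : pc.1 = some ':' <;> by_cases h3 : pc.2 = ')' <;>
      simp only [h1, h2, h3, ne_eq, not_true, not_false_iff, and_true, and_false] <;>
      simp [ih] <;> omega

theorem loopA_eq (cs : List Char) :
    isBalancedLoop cs = (((pvZp none cs).map pvDmax).sum, pvClamp 0 ((pvZp none cs).map pvD)) := by
  unfold isBalancedLoop
  have hb : (fun (st : Int × Int) i =>
      if PySem.List.pyGet? cs i = some '(' then
        (st.1 + 1, if i = 0 ∨ PySem.List.pyGet? cs (i - 1) ≠ some ':' then st.2 + 1 else st.2)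
      else if PySem.List.pyGet? cs i = some ')' then
        ((if i = 0 ∨ PySem.List.pyGet? cs (i - 1) ≠ some ':' then st.1 - 1 else st.1),
         max 0 (st.2 - 1))
      else st)
      = fun st i => pvGA st ((if i = 0 then none else PySem.List.pyGet? cs (i - 1)), PySem.List.pyGet? cs i) := by
    funext st i
    by_cases hi0 : i = 0 <;> simp [pvGA, hi0]
  rw [hb, pvFoldIdx cs pvGA (0, 0)]
  rw [foldA_struct _ 0 0 le_rfl]
  simp

theorem opens_eq (cs : List Char) :
    isBalancedAltOpens cs
      = ((pvZp none cs).map (fun pc => if pc.2 = '(' then (1:Int) else 0)).sum := by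
  unfold isBalancedAltOpens
  have hb : (fun (acc : Int) (c : Char) => if c = '(' then acc + 1 else acc)
      = fun acc c => acc + (if c = '(' then (1:Int) else 0) := by
    funext acc c; by_cases h : c = '(' <;> simp [h]
  rw [hb, PySem.List.foldl_add]
  conv_lhs => rw [← pvZp_map_snd cs none, List.map_map]
  simp [Function.comp_def]

theorem hard_eq (cs : List Char) :
    isBalancedAltHard cs
      = ((pvZp none cs).map (fun pc => if pc.2 = ')' ∧ pc.1 ≠ some ':' then (1:Int) else 0)).sum := by
  unfold isBalancedAltHard
  have hb : (fun (acc : Int) i =>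
      if PySem.List.pyGet? cs i = some ')' ∧ (i = 0 ∨ PySem.List.pyGet? cs (i - 1) ≠ some ':') then
        acc + 1
      else acc)
      = fun acc i => pvGH acc ((if i = 0 then none else PySem.List.pyGet? cs (i - 1)), PySem.List.pyGet? cs i) := by
    funext acc i
    by_cases hi0 : i = 0 <;> simp [pvGH, hi0]
  rw [hb, pvFoldIdx cs pvGH 0]
  have hb2 : (fun (acc : Int) (pc : Option Char × Char) => pvGH acc (pc.1, some pc.2))
      = fun acc pc => acc + (if pc.2 = ')' ∧ pc.1 ≠ some ':' then (1:Int) else 0) := by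
    funext acc pc
    by_cases h1 : pc.2 = ')' <;> by_cases h2 : pc.1 = some ':' <;> simp [pvGH, h1, h2]
  rw [hb2, PySem.List.foldl_add]
  simp

theorem scan_eq (cs : List Char) :
    (isBalancedAltScan cs).2 = pvClamp 0 ((pvZp none cs).map pvD) := by
  unfold isBalancedAltScan
  have hb : (fun (st : Int × Int) i =>
      let run :=
        if PySem.List.pyGet? cs i = some '(' then
          (if i = 0 ∨ PySem.List.pyGet? cs (i - 1) ≠ some ':' then st.1 + 1 else st.1)
        else if PySem.List.pyGet? cs i = some ')' then st.1 - 1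
        else st.1
      (run, if run > st.2 then run else st.2))
      = fun st i => pvGS st ((if i = 0 then none else PySem.List.pyGet? cs (i - 1)), PySem.List.pyGet? cs i) := by
    funext st i
    by_cases hi0 : i = 0 <;> simp [pvGS, hi0]
  rw [hb, pvFoldIdxRev cs pvGS (0, 0)]
  have hb2 : (fun (st : Int × Int) (pc : Option Char × Char) => pvGS st (pc.1, some pc.2))
      = fun st pc => pvStep st (pvD pc) := by
    funext st pc
    by_cases h1 : pc.2 = '(' <;> by_cases h2 : pc.1 = some ':' <;> by_cases h3 : pc.2 = ')' <;>
      simp [pvGS, pvStep, pvD, h1, h2, h3] <;> (try constructor) <;> (try split_ifs) <;> omega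
  rw [hb2, ← List.foldl_map, List.map_reverse]
  rw [pvScan_pm _ 0 0 le_rfl]
  have := pvPm_nonneg (((pvZp none cs).map pvD).reverse)
  rw [pvClamp_rev]
  omega

-- ===== VERDICT (by name: the statement is the Claim_ definition above) =====
theorem isBalanced_spec : Claim_equal_isBalanced := by
  intro s _
  unfold Spec_isBalanced isBalanced isBalanced_alt
  generalize s.toList = cs
  by_cases hnil : cs = []
  · subst hnil; decide
  · rw [if_neg hnil]
    by_cases hone : cs.length = 1 ∧
        ((cs ≠ [] ∧ ∀ c ∈ cs, PySem.Chars.isalpha c) ∨ cs = [' '] ∨ cs = [':'])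
    · rw [if_pos hone]
      obtain ⟨hlen, hcase⟩ := hone
      obtain ⟨c, rfl⟩ := List.length_eq_one_iff.mp hlen
      have hc : c ≠ '(' ∧ c ≠ ')' := by
        rcases hcase with h | h | h
        · have ha := h.2 c (by simp)
          constructor <;> rintro rfl <;>
            simp [PySem.Chars.isalpha, PySem.Chars.isupper, PySem.Chars.islower] at ha
        · rw [show c = ' ' by simpa using h]; decide
        · rw [show c = ':' by simpa using h]; decide
      rw [opens_eq, hard_eq, scan_eq]
      have hz : pvZp none [c] = [(none, c)] := rfl
      rw [hz]
      simp [pvD, hc.1, hc.2, pvClamp]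
    · rw [if_neg hone]
      rw [loopA_eq, opens_eq, hard_eq, scan_eq]
      have hsum := pvSum_dmax (pvZp none cs)
      have hcl : 0 ≤ pvClamp 0 ((pvZp none cs).map pvD) := by
        rw [pvClamp_rev]; exact pvPm_nonneg _
      simp only []
      split_ifs with hA hB hB <;> simp_all <;> omega
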